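-- pv_equiv track=rewrite | github.com/sealuzh/JavaAPIUsageTracer | calculate_ranking.py | select_top_n
-- ===== SOURCE A (Python) =====
-- def get_all_methods(ranking):
--     methods = []
--     for project in ranking:
--         for method in ranking[project]:
--             if method not in methods:
--                 methods += [method]
--     return methods
--
-- def select_top_n(ranking, n):
--     aggregated_weights = {}
--     methods = get_all_methods(ranking)
--     for method in methods:
--         agg = 0
--         for project in ranking:
--             if method in ranking[project]:
--                 agg += ranking[project][method]
--         aggregated_weights[method] = agg
--     sorted_list = sorted(aggregated_weights.items(), key=lambda x: -1 * x[1])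
--     return sorted_list[:n+1]
-- ===== SOURCE B (Python) =====
-- def select_top_n(ranking, n):
--     totals = {}
--     for methods in ranking.values():
--         for m, w in methods.items():
--             totals[m] = totals.get(m, 0) + w
--     ranked = sorted(totals.items(), key=lambda kv: -kv[1])
--     return ranked[:n+1]
-- ===== Notes on version B (the rewrite author's own statement) =====
-- stated objective: faster
-- what changed: A first collects the distinct methods and then, for each method, rescans every project's dict; B makes one pass over all (method, weight) entries accumulating sums in a dict, then sorts, removing both the quadratic dedup and the per-method rescan.
import Mathlib
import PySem

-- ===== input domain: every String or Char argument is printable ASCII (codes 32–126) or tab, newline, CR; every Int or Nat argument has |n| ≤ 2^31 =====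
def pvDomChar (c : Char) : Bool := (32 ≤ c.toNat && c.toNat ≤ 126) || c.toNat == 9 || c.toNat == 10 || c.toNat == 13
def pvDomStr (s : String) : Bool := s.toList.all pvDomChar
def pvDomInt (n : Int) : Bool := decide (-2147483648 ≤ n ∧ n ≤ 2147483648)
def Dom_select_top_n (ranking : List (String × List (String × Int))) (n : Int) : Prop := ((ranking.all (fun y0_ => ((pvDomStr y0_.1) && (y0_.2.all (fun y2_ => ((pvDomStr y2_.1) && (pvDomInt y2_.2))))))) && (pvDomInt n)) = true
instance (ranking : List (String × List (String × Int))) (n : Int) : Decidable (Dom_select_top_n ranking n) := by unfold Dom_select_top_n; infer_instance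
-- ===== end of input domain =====

-- B replaces A's dedup-then-rescan aggregation by a single accumulating pass over all entries plus one sort (same return value, asymptotically faster).


-- ===== PORT A =====
-- 'ranking[project]' is ported as getD with default []: project always comes from the dict's own keys, so the KeyError branch is unreachable.
def pvGetAllMethods (ranking : List (String × List (String × Int))) : List String :=
  let d := PySem.Dict.mk ranking
  d.keys.foldl (fun methods project =>
    (PySem.Dict.mk (d.getD project [])).keys.foldl
      (fun methods method =>
        if method ∉ methods then methods ++ [method] else methods)
      methods) []

def select_top_n (ranking : List (String × List (String × Int))) (n : Int) : List (String × Int) :=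
  let d := PySem.Dict.mk ranking
  let methods := pvGetAllMethods ranking
  let aggregated := methods.foldl (fun aw method =>
      let agg := d.keys.foldl (fun agg project =>
          let pm := PySem.Dict.mk (d.getD project [])
          if pm.contains method then agg + pm.getD method 0 else agg) (0 : Int)
      aw.insert method agg)
    (PySem.Dict.empty (κ := String) (ν := Int))
  let sorted_list := PySem.List.sorted aggregated.items (fun x => -1 * x.2)
  PySem.List.slice sorted_list none (some (n + 1))

-- ===== PORT B =====
def select_top_n_alt (ranking : List (String × List (String × Int))) (n : Int) : List (String × Int) :=
  let totals := ranking.foldl (fun t pr =>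
      pr.2.foldl (fun t mw => t.modify mw.1 0 (· + mw.2)) t)
    (PySem.Dict.empty (κ := String) (ν := Int))
  let ranked := PySem.List.sorted totals.items (fun kv => -kv.2)
  PySem.List.slice ranked none (some (n + 1))

-- ===== PRECONDITION & SPEC =====
-- Pre_ excludes association lists with a duplicate project key or a duplicate method key inside a project:
-- such lists do not represent a Python dict (duplicates collapse on conversion), so A's value there is accidental.
def Pre_select_top_n (ranking : List (String × List (String × Int))) (n : Int) : Prop :=
  (ranking.map Prod.fst).Nodup ∧ ∀ pr ∈ ranking, (pr.2.map Prod.fst).Nodup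
instance (ranking : List (String × List (String × Int))) (n : Int) : Decidable (Pre_select_top_n ranking n) := by unfold Pre_select_top_n; infer_instance
def pvWitness_select_top_n : (List (String × List (String × Int))) × Int :=
  ([("p1", [("m1", 3), ("m2", 1)]), ("p2", [("m2", 5)])], 1)

def Spec_select_top_n (ranking : List (String × List (String × Int))) (n : Int) (out : List (String × Int)) : Prop := out = select_top_n_alt ranking n
instance (ranking : List (String × List (String × Int))) (n : Int) (out : List (String × Int)) : Decidable (Spec_select_top_n ranking n out) := by unfold Spec_select_top_n; infer_instance

-- ===== CLAIM (what is proved, stated in full; the proofs are below) =====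
def Claim_equal_select_top_n : Prop := ∀ (ranking : List (String × List (String × Int))) (n : Int), Dom_select_top_n ranking n → Pre_select_top_n ranking n → Spec_select_top_n ranking n (select_top_n ranking n)

-- ===== LEMMAS AND PROOFS =====

-- all (method, weight) entries, and all method keys, in order
def pvAllPairs (ranking : List (String × List (String × Int))) : List (String × Int) :=
  ranking.flatMap (fun pr => pr.2)

-- a nested fold over a flatMap is the flat fold
theorem pv_foldl_flatMap {α β γ : Type} (l : List α) (f : α → List β) (g : γ → β → γ) (init : γ) :
    (l.flatMap f).foldl g init = l.foldl (fun acc x => (f x).foldl g acc) init := by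
  induction l generalizing init with
  | nil => rfl
  | cons h t ih => simp [List.foldl_append, ih]

-- folding over the keys of (Dict.mk l) with getD-lookup is folding over l itself, when keys are nodup
theorem pv_foldl_keys_getD {γ : Type} (l : List (String × List (String × Int)))
    (hnd : (l.map Prod.fst).Nodup)
    (g : γ → String → List (String × Int) → γ) (init : γ) :
    (PySem.Dict.mk l).keys.foldl (fun acc k => g acc k ((PySem.Dict.mk l).getD k [])) init
      = l.foldl (fun acc pr => g acc pr.1 pr.2) init := by
  have hkeys : (PySem.Dict.mk l).keys = l.map Prod.fst := rfl
  rw [hkeys, List.foldl_map]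
  refine PySem.List.foldl_congr_mem l _ _ init (fun acc pr hpr => ?_)
  have : (PySem.Dict.mk l).getD pr.1 [] = pr.2 :=
    PySem.Dict.getD_of_mem_items (d := PySem.Dict.mk l) (k := pr.1) (v := pr.2) hpr hnd []
  rw [this]

-- Python's "if x not in s: s += [x]" is Set.add
theorem pv_step_add {s : PySem.Set String} {x : String} :
    (if x ∉ s then s ++ [x] else s) = PySem.Set.add s x := by
  by_cases hx : x ∈ s
  · rw [PySem.Set.add_of_mem hx]; simp [hx]
  · rw [PySem.Set.add_of_not_mem hx]; simp [hx]

-- a fold of Set.update over a list is one update by the flattened list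
theorem pv_foldl_update {α : Type} (l : List α) (f : α → List String) (s : PySem.Set String) :
    l.foldl (fun s x => PySem.Set.update s (f x)) s = PySem.Set.update s (l.flatMap f) := by
  induction l generalizing s with
  | nil => simp [PySem.Set.update]
  | cons h t ih => simp [List.flatMap_cons, PySem.Set.update_append, ih]

-- A's methods list is set(all method keys) in first-occurrence order
theorem pv_methods_eq (ranking : List (String × List (String × Int)))
    (hnd : (ranking.map Prod.fst).Nodup) :
    pvGetAllMethods ranking = PySem.Set.ofList ((pvAllPairs ranking).map Prod.fst) := by
  unfold pvGetAllMethods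
  rw [pv_foldl_keys_getD ranking hnd
      (g := fun acc k v => (PySem.Dict.mk v).keys.foldl
        (fun methods method => if method ∉ methods then methods ++ [method] else methods) acc) (init := [])]
  have hstep : ∀ (pr : String × List (String × Int)) (acc : PySem.Set String),
      (PySem.Dict.mk pr.2).keys.foldl
        (fun methods method => if method ∉ methods then methods ++ [method] else methods) acc
        = PySem.Set.update acc (pr.2.map Prod.fst) := by
    intro pr acc
    have hk : (PySem.Dict.mk pr.2).keys = pr.2.map Prod.fst := rfl
    rw [hk, List.foldl_map, PySem.Set.update_map_eq_foldl_add]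
    exact PySem.List.foldl_congr_mem _ _ _ _ (fun a x _ => pv_step_add)
  rw [PySem.List.foldl_congr_mem _ _ _ _ (fun acc pr _ => hstep pr acc)]
  rw [pv_foldl_update]
  simp [PySem.Set.update_nil_left, pvAllPairs, List.map_flatMap]

-- dict value of an assoc list with nodup keys, as a filter-sum
theorem pv_filter_sum (l : List (String × Int)) (hl : (l.map Prod.fst).Nodup) (m : String) :
    (if (PySem.Dict.mk l).contains m then (PySem.Dict.mk l).getD m 0 else 0)
      = ((l.filter (fun p => p.1 == m)).map Prod.snd).sum := by
  induction l with
  | nil => simp [PySem.Dict.contains]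
  | cons h t ih =>
    obtain ⟨a, b⟩ := h
    simp only [List.map_cons, List.nodup_cons] at hl
    by_cases hm : a = m
    · subst hm
      have hnot : ∀ p ∈ t, ¬(p.1 == a) := by
        intro p hp hpe
        exact hl.1 (List.mem_map.mpr ⟨p, hp, by simpa using hpe⟩)
      have hfil : t.filter (fun p => p.1 == a) = [] := List.filter_eq_nil_iff.mpr hnot
      have hc : (PySem.Dict.mk ((a, b) :: t)).contains a = true := by
        simp [PySem.Dict.contains_mk]
      have hg : (PySem.Dict.mk ((a, b) :: t)).getD a 0 = b := by
        simp [PySem.Dict.getD_eq_get?_getD, PySem.Dict.get?_mk_cons]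
      rw [List.filter_cons]
      simp [hfil, hc, hg]
    · have hb : (a == m) = false := by simpa using hm
      have hc : (PySem.Dict.mk ((a, b) :: t)).contains m = (PySem.Dict.mk t).contains m := by
        simp [PySem.Dict.contains_mk, hb]
      have hg : (PySem.Dict.mk ((a, b) :: t)).getD m 0 = (PySem.Dict.mk t).getD m 0 := by
        simp [PySem.Dict.getD_eq_get?_getD, PySem.Dict.get?_mk_cons, hb]
      have hfc : List.filter (fun p => p.1 == m) ((a, b) :: t) = List.filter (fun p => p.1 == m) t := by
        simp [hb]
      rw [hfc, ← ih hl.2, hc, hg]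

-- B's accumulated total for key m
theorem pv_getD_foldl_modify_add (l : List (String × Int)) (d : PySem.Dict String Int) (m : String) :
    (l.foldl (fun d p => d.modify p.1 0 (· + p.2)) d).getD m 0
      = d.getD m 0 + ((l.filter (fun p => p.1 == m)).map Prod.snd).sum := by
  induction l generalizing d with
  | nil => simp
  | cons h t ih =>
    simp only [List.foldl_cons, ih, List.filter_cons]
    by_cases hm : h.1 = m
    · subst hm
      simp [PySem.Dict.getD_modify_self]
      ring
    · have : (h.1 == m) = false := by simp [hm]
      simp only [PySem.Dict.getD_modify, this, Bool.false_eq_true, if_false]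
      rw [if_neg (fun h => hm h.symm)]

-- a conditional-accumulate fold is init plus a sum
theorem pv_foldl_if_add {α : Type} (l : List α) (c : α → Bool) (v : α → Int) (init : Int) :
    l.foldl (fun agg x => if c x then agg + v x else agg) init
      = init + (l.map (fun x => if c x then v x else 0)).sum := by
  induction l generalizing init with
  | nil => simp
  | cons h t ih =>
    simp only [List.foldl_cons, List.map_cons, List.sum_cons, ih]
    by_cases hc : c h <;> simp [hc] <;> try ring

-- the filtered weight sum over all entries, split per project
theorem pv_sum_filter_flatMap (ranking : List (String × List (String × Int))) (m : String) :
    (((ranking.flatMap (fun pr => pr.2)).filter (fun p => p.1 == m)).map Prod.snd).sum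
      = (ranking.map (fun pr => ((pr.2.filter (fun p => p.1 == m)).map Prod.snd).sum)).sum := by
  induction ranking with
  | nil => simp
  | cons h t ih => simp [List.filter_append, ih]

-- ===== VERDICT (by name: the statement is the Claim_ definition above) =====
theorem select_top_n_spec : Claim_equal_select_top_n := by
  intro ranking n _hdom hpre
  obtain ⟨hnd, hinner⟩ := hpre
  unfold Spec_select_top_n select_top_n select_top_n_alt
  have hflat : ranking.foldl (fun t pr => pr.2.foldl (fun t mw => t.modify mw.1 0 (· + mw.2)) t)
        (PySem.Dict.empty (κ := String) (ν := Int))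
      = (pvAllPairs ranking).foldl (fun t mw => t.modify mw.1 0 (· + mw.2))
        (PySem.Dict.empty (κ := String) (ν := Int)) := by
    rw [pvAllPairs, pv_foldl_flatMap]
  have hTkeys : ((pvAllPairs ranking).foldl (fun t mw => t.modify mw.1 0 (· + mw.2))
        (PySem.Dict.empty (κ := String) (ν := Int))).keys
      = PySem.Set.ofList ((pvAllPairs ranking).map Prod.fst) := by
    rw [PySem.Dict.keys_foldl_modify_key (pvAllPairs ranking) Prod.fst 0 (fun _ x => (· + x.2)) _]
    rw [PySem.Dict.keys_empty, PySem.Set.update_nil_left]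
  have hTnodup : ((pvAllPairs ranking).foldl (fun t mw => t.modify mw.1 0 (· + mw.2))
        (PySem.Dict.empty (κ := String) (ν := Int))).keys.Nodup := by
    rw [hTkeys]; exact PySem.Set.nodup_ofList _
  have hTget : ∀ m : String, ((pvAllPairs ranking).foldl (fun t mw => t.modify mw.1 0 (· + mw.2))
        (PySem.Dict.empty (κ := String) (ν := Int))).getD m 0
      = (((pvAllPairs ranking).filter (fun p => p.1 == m)).map Prod.snd).sum := by
    intro m
    rw [pv_getD_foldl_modify_add, PySem.Dict.getD_empty, zero_add]
  have hTitems : ((pvAllPairs ranking).foldl (fun t mw => t.modify mw.1 0 (· + mw.2))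
        (PySem.Dict.empty (κ := String) (ν := Int))).items
      = (PySem.Set.ofList ((pvAllPairs ranking).map Prod.fst)).map
          (fun m => (m, (((pvAllPairs ranking).filter (fun p => p.1 == m)).map Prod.snd).sum)) := by
    rw [PySem.Dict.items_eq_map_keys _ hTnodup 0, hTkeys]
    exact List.map_congr_left (fun m _ => by rw [hTget m])
  -- A's inner aggregation loop computes the same filtered sum
  have hAinner : ∀ m : String,
      (PySem.Dict.mk ranking).keys.foldl (fun agg project =>
          if (PySem.Dict.mk ((PySem.Dict.mk ranking).getD project [])).contains m then
            agg + (PySem.Dict.mk ((PySem.Dict.mk ranking).getD project [])).getD m 0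
          else agg) (0 : Int)
        = (((pvAllPairs ranking).filter (fun p => p.1 == m)).map Prod.snd).sum := by
    intro m
    rw [pv_foldl_keys_getD ranking hnd
        (g := fun agg _ v => if (PySem.Dict.mk v).contains m then agg + (PySem.Dict.mk v).getD m 0 else agg)
        (init := (0 : Int))]
    rw [pv_foldl_if_add ranking (fun pr => (PySem.Dict.mk pr.2).contains m)
        (fun pr => (PySem.Dict.mk pr.2).getD m 0) 0, zero_add]
    rw [List.map_congr_left (fun pr hpr => pv_filter_sum pr.2 (hinner pr hpr) m)]
    rw [pvAllPairs, pv_sum_filter_flatMap]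
  have hkey : (fun x : String × Int => -1 * x.2) = (fun kv : String × Int => -kv.2) := by
    funext x; ring
  show PySem.List.slice (PySem.List.sorted
      ((pvGetAllMethods ranking).foldl (fun aw method =>
          aw.insert method ((PySem.Dict.mk ranking).keys.foldl (fun agg project =>
            if (PySem.Dict.mk ((PySem.Dict.mk ranking).getD project [])).contains method then
              agg + (PySem.Dict.mk ((PySem.Dict.mk ranking).getD project [])).getD method 0
            else agg) (0 : Int)))
        (PySem.Dict.empty (κ := String) (ν := Int))).items
      (fun x => -1 * x.2)) none (some (n + 1))
    = PySem.List.slice (PySem.List.sorted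
      (ranking.foldl (fun t pr => pr.2.foldl (fun t mw => t.modify mw.1 0 (· + mw.2)) t)
        (PySem.Dict.empty (κ := String) (ν := Int))).items
      (fun kv => -kv.2)) none (some (n + 1))
  rw [hkey, hflat, hTitems]
  congr 1
  congr 1
  rw [PySem.List.foldl_congr_mem (pvGetAllMethods ranking) _
      (fun aw m => aw.insert m ((((pvAllPairs ranking).filter (fun p => p.1 == m)).map Prod.snd).sum))
      _ (fun aw m _ => by rw [hAinner m])]
  rw [pv_methods_eq ranking hnd]
  rw [PySem.Dict.items_foldl_insert_fresh (PySem.Set.ofList ((pvAllPairs ranking).map Prod.fst))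
      (fun a => a) (fun m => (((pvAllPairs ranking).filter (fun p => p.1 == m)).map Prod.snd).sum)
      (PySem.Dict.empty (κ := String) (ν := Int))
      (fun a _ => PySem.Dict.contains_empty a)
      (by simpa using PySem.Set.nodup_ofList ((pvAllPairs ranking).map Prod.fst))]
  simp [PySem.Dict.empty]
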